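-- pv_equiv track=rewrite | github.com/k-harada/AtCoder | ABC/ABC1XX/ABC183/C.py | solve
-- ===== SOURCE A (Python) =====
-- from itertools import permutations
--
-- def solve(n, k, t_list):
--
--     res = 0
--
--     for p in permutations(range(1, n)):
--         d = t_list[0][p[0]]
--         d += t_list[p[-1]][0]
--         for i in range(n - 2):
--             d += t_list[p[i]][p[i + 1]]
--         if d == k:
--             res += 1
--
--     return res
-- ===== SOURCE B (Python) =====
-- def solve(n, k, t_list):
--     # Recursive DFS/backtracking from node 0 over the unvisited nodes,
--     # accumulating the partial tour distance; counts tours closing at 0 with total k.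
--     def dfs(cur, remaining, acc):
--         if not remaining:
--             return 1 if acc + t_list[cur][0] == k else 0
--         s = 0
--         for i in range(len(remaining)):
--             nxt = remaining[i]
--             s += dfs(nxt, remaining[:i] + remaining[i + 1:], acc + t_list[cur][nxt])
--         return s
--     return dfs(0, list(range(1, n)), 0)
-- ===== Notes on version B (the rewrite author's own statement) =====
-- stated objective: alternative
-- what changed: Replaces the itertools.permutations loop (which rebuilds each full tour and re-walks it to sum its edges) with a recursive DFS/backtracking helper that extends a partial tour edge by edge, carrying the accumulated distance and the list of unvisited nodes.
-- outside the precondition, e.g. on solve(3, 10, [[0, 1, 2], [3, 0, 4], [5, 6]]): A returns 1, B returns 1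
-- crash fix: For n <= 1 with a nonempty first row A raises IndexError (p[0] on the empty permutation) while B returns 1 if t_list[0][0] == k else 0, counting the trivial tour that stays at 0. — e.g. on solve(1, 0, [[0]]): A raises IndexError, B returns 1
import Mathlib
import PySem

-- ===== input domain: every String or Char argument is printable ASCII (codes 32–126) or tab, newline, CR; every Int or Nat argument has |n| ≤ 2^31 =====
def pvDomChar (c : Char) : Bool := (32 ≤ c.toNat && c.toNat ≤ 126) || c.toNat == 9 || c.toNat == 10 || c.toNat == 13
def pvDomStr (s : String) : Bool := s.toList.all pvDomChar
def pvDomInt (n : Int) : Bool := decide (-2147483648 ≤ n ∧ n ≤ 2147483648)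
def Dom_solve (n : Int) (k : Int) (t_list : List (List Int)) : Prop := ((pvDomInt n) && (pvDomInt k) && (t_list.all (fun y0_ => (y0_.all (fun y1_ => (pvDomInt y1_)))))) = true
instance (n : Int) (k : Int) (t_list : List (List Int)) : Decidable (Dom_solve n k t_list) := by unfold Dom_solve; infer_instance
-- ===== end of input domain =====

-- B replaces the permutations loop by a recursive DFS/backtracking helper that extends a
-- partial tour edge by edge (alternative decomposition, same asymptotic cost).


-- ===== PORT A =====
-- t_list[i][j]; the 0/[] defaults are never reached inside Pre_solve (all indices in range).
def tget (t : List (List Int)) (i j : Int) : Int :=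
  PySem.List.pyGetD (PySem.List.pyGetD t i []) j 0

def solve (n : Int) (k : Int) (t_list : List (List Int)) : Int :=
  let nodes := PySem.List.pyRange 1 n 1
  (PySem.List.permutations nodes nodes.length).foldl
    (fun res p =>
      let d0 := tget t_list 0 (PySem.List.pyGetD p 0 0)
      let d1 := d0 + tget t_list (PySem.List.pyGetD p (-1) 0) 0
      let d2 := (PySem.List.pyRange 0 (n - 2) 1).foldl
        (fun d i => d + tget t_list (PySem.List.pyGetD p i 0) (PySem.List.pyGetD p (i + 1) 0)) d1
      if d2 = k then res + 1 else res)
    0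

-- ===== PORT B =====
-- dfs(cur, remaining, acc) of Source B; the extra fuel argument (= remaining.length at every
-- call reached from solve_alt) is only a structural-recursion device for totality.
-- remaining.eraseIdx i is remaining[:i] + remaining[i+1:] (exact: 0 ≤ i < len(remaining)).
def dfsB (t : List (List Int)) (k : Int) : Nat → Int → List Int → Int → Int
  | 0, cur, _, acc => if acc + tget t cur 0 = k then 1 else 0
  | fuel + 1, cur, remaining, acc =>
      (List.range remaining.length).foldl
        (fun s i =>
          let nxt := remaining.getD i 0
          s + dfsB t k fuel nxt (remaining.eraseIdx i) (acc + tget t cur nxt))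
        0

def solve_alt (n : Int) (k : Int) (t_list : List (List Int)) : Int :=
  let nodes := PySem.List.pyRange 1 n 1
  dfsB t_list k nodes.length 0 nodes 0

-- ===== PRECONDITION & SPEC =====
-- A raises IndexError when n ≤ 1 (p[0] on the empty permutation) or when a visited cell of
-- the table is missing; Pre_solve asks for a full n×n table, slightly narrower than exact
-- (a ragged table whose missing cells are never touched, e.g. a short last row, is excluded
-- although A returns there — see the cite in the claim).
def Pre_solve (n : Int) (k : Int) (t_list : List (List Int)) : Prop :=
  2 ≤ n ∧ n ≤ t_list.length ∧ ∀ row ∈ t_list.take n.toNat, n ≤ (row.length : Int)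
instance (n : Int) (k : Int) (t_list : List (List Int)) : Decidable (Pre_solve n k t_list) := by
  unfold Pre_solve; infer_instance

def pvWitness_solve : Int × Int × List (List Int) := (3, 10, [[0, 1, 2], [3, 0, 4], [5, 6, 0]])

-- For n ≤ 1 with a nonempty first row A raises IndexError (p[0] on the empty permutation)
-- while B returns 1 if t_list[0][0] == k else 0, counting the trivial tour that stays at 0.
def Raises_solve (n : Int) (k : Int) (t_list : List (List Int)) : Prop :=
  n ≤ 1 ∧ t_list ≠ [] ∧ t_list.headI ≠ []
instance (n : Int) (k : Int) (t_list : List (List Int)) : Decidable (Raises_solve n k t_list) := by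
  unfold Raises_solve; infer_instance
def pvRaiseWitness_solve : Int × Int × List (List Int) := (1, 0, [[0]])
def pvRaiseWitnessOut_solve : Int := 1

def Spec_solve (n : Int) (k : Int) (t_list : List (List Int)) (out : Int) : Prop :=
  out = solve_alt n k t_list
instance (n : Int) (k : Int) (t_list : List (List Int)) (out : Int) : Decidable (Spec_solve n k t_list out) := by
  unfold Spec_solve; infer_instance

-- ===== CLAIM (what is proved, stated in full; the proofs are below) =====
def Claim_equal_solve : Prop := ∀ (n : Int) (k : Int) (t_list : List (List Int)),
  Dom_solve n k t_list → Pre_solve n k t_list → Spec_solve n k t_list (solve n k t_list)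

def Claim_raises_solve : Prop :=
  (∀ (n : Int) (k : Int) (t_list : List (List Int)), Dom_solve n k t_list →
      Raises_solve n k t_list → ¬ Pre_solve n k t_list) ∧
  (Dom_solve (pvRaiseWitness_solve.1) (pvRaiseWitness_solve.2.1) (pvRaiseWitness_solve.2.2) ∧
    Raises_solve (pvRaiseWitness_solve.1) (pvRaiseWitness_solve.2.1) (pvRaiseWitness_solve.2.2) ∧
    solve_alt (pvRaiseWitness_solve.1) (pvRaiseWitness_solve.2.1) (pvRaiseWitness_solve.2.2) = pvRaiseWitnessOut_solve)

-- ===== LEMMAS AND PROOFS =====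

-- Cost of the path cur → p₀ → p₁ → … → p_last → 0 (cur → 0 for empty p).
def chainCost (t : List (List Int)) (cur : Int) : List Int → Int
  | [] => tget t cur 0
  | x :: rest => tget t cur x + chainCost t x rest

theorem sum_flatMap' {α : Type} (l : List α) (f : α → List Int) :
    (l.flatMap f).sum = (l.map (fun x => (f x).sum)).sum := by
  induction l with
  | nil => simp
  | cons a t ih => simp [List.flatMap_cons, ih]

theorem permutations_succ {α : Type} (xs : List α) (r : Nat) :
    PySem.List.permutations xs (r + 1) =
      (List.range xs.length).flatMap (fun i =>
        match xs[i]? with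
        | none => []
        | some x => (PySem.List.permutations (xs.eraseIdx i) r).map (x :: ·)) := by
  conv_lhs => rw [PySem.List.permutations]
  rfl

theorem pyGetD_neg_one (p : List Int) (h : p ≠ []) :
    PySem.List.pyGetD p (-1) 0 = p.getLastD 0 := by
  have hl : 1 ≤ p.length := List.length_pos_iff.mpr h
  rw [PySem.List.pyGetD, PySem.List.pyGet?, PySem.List.pyIdx?]
  rw [if_neg (by omega), if_pos (by omega)]
  simp [List.getLastD_eq_getLast?, ← List.getLast?_eq_getElem?]

-- dfsB counts, over all permutations p of xs, the tours with acc + chainCost cur p = k.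
theorem dfsB_eq_sum (t : List (List Int)) (k : Int) :
    ∀ (fuel : Nat) (xs : List Int), xs.length = fuel → ∀ (cur acc : Int),
      dfsB t k fuel cur xs acc =
        ((PySem.List.permutations xs xs.length).map
          (fun p => if acc + chainCost t cur p = k then (1 : Int) else 0)).sum := by
  intro fuel
  induction fuel with
  | zero =>
    intro xs hlen cur acc
    have hx : xs = [] := List.length_eq_zero_iff.mp hlen
    subst hx
    simp [dfsB, chainCost]
  | succ fuel ih =>
    intro xs hlen cur acc
    have h1 : dfsB t k (fuel + 1) cur xs acc =
        0 + ((List.range xs.length).map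
          (fun i => dfsB t k fuel (xs.getD i 0) (xs.eraseIdx i) (acc + tget t cur (xs.getD i 0)))).sum := by
      exact PySem.List.foldl_add (List.range xs.length)
        (fun i => dfsB t k fuel (xs.getD i 0) (xs.eraseIdx i) (acc + tget t cur (xs.getD i 0))) 0
    rw [h1, zero_add, hlen, permutations_succ, hlen, List.map_flatMap, sum_flatMap']
    refine congrArg List.sum (List.map_congr_left ?_)
    intro i hi
    have hi' : i < xs.length := by have := List.mem_range.mp hi; omega
    have hget : xs[i]? = some xs[i] := List.getElem?_eq_getElem hi'
    have hgetD : xs.getD i 0 = xs[i] := List.getD_eq_getElem xs 0 hi'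
    have herase : (xs.eraseIdx i).length = fuel := by
      rw [List.length_eraseIdx_of_lt hi']; omega
    rw [hgetD, ih (xs.eraseIdx i) herase xs[i] (acc + tget t cur xs[i])]
    simp only [hget, List.map_map, herase]
    refine congrArg List.sum (List.map_congr_left ?_)
    intro p _
    simp [chainCost, add_assoc]

-- chainCost written as A computes it: head edge + consecutive edges + closing edge.
theorem chain_eq (t : List (List Int)) :
    ∀ (rest : List Int) (x cur : Int),
      chainCost t cur (x :: rest) =
        tget t cur x +
          ((List.range rest.length).map
            (fun i => tget t ((x :: rest).getD i 0) ((x :: rest).getD (i + 1) 0))).sum +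
          tget t ((x :: rest).getLastD 0) 0 := by
  intro rest
  induction rest with
  | nil => intro x cur; simp [chainCost]
  | cons y rs ih =>
    intro x cur
    simp only [chainCost] at *
    rw [ih y x]
    simp only [List.length_cons, List.range_succ_eq_map, List.map_cons, List.map_map, List.sum_cons]
    have : ∀ i ∈ List.range rs.length,
        ((fun i => tget t ((x :: y :: rs).getD i 0) ((x :: y :: rs).getD (i + 1) 0)) ∘ Nat.succ) i
          = (fun i => tget t ((y :: rs).getD i 0) ((y :: rs).getD (i + 1) 0)) i := by
      intro i _
      simp
    rw [List.map_congr_left this]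
    simp
    ring

theorem foldl_if_eq_sum {α : Type} (f : α → Int) (k : Int) (l : List α) (a : Int) :
    l.foldl (fun res p => if f p = k then res + 1 else res) a
      = a + (l.map (fun p => if f p = k then (1 : Int) else 0)).sum := by
  induction l generalizing a with
  | nil => simp
  | cons p tl ih => simp only [List.foldl_cons, List.map_cons, List.sum_cons, ih]; split <;> ring

theorem solve_eq_dfsB (n k : Int) (t_list : List (List Int)) (hn : 2 ≤ n) :
    solve n k t_list =
      dfsB t_list k (PySem.List.pyRange 1 n 1).length 0 (PySem.List.pyRange 1 n 1) 0 := by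
  set nodes := PySem.List.pyRange 1 n 1 with hnodes
  have hA : solve n k t_list =
      0 + ((PySem.List.permutations nodes nodes.length).map
        (fun p => if (tget t_list 0 (PySem.List.pyGetD p 0 0)
            + tget t_list (PySem.List.pyGetD p (-1) 0) 0
            + ((PySem.List.pyRange 0 (n - 2) 1).map
                (fun i => tget t_list (PySem.List.pyGetD p i 0) (PySem.List.pyGetD p (i + 1) 0))).sum) = k
          then (1 : Int) else 0)).sum := by
    rw [show solve n k t_list = (PySem.List.permutations nodes nodes.length).foldl
        (fun res p => if (tget t_list 0 (PySem.List.pyGetD p 0 0)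
            + tget t_list (PySem.List.pyGetD p (-1) 0) 0
            + ((PySem.List.pyRange 0 (n - 2) 1).map
                (fun i => tget t_list (PySem.List.pyGetD p i 0) (PySem.List.pyGetD p (i + 1) 0))).sum) = k
          then res + 1 else res) 0 from by
      unfold solve
      show List.foldl _ (0 : Int) (PySem.List.permutations nodes nodes.length) = _
      congr 1
      funext res p
      show (if _ = k then res + 1 else res) = _
      rw [PySem.List.foldl_add]]
    exact foldl_if_eq_sum _ k _ 0
  rw [hA, dfsB_eq_sum t_list k nodes.length nodes rfl 0 0, zero_add]
  refine congrArg List.sum (List.map_congr_left ?_)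
  intro p hp
  have hperm := PySem.List.perm_of_mem_permutations hp
  have hplen : p.length = (n - 1).toNat := by
    rw [hperm.length_eq, hnodes, PySem.List.length_pyRange_one]
  have hpne : p ≠ [] := by
    intro h; rw [h] at hplen; simp at hplen; omega
  obtain ⟨x, rest, rfl⟩ := List.exists_cons_of_ne_nil hpne
  have hd : tget t_list 0 (PySem.List.pyGetD (x :: rest) 0 0)
      + tget t_list (PySem.List.pyGetD (x :: rest) (-1) 0) 0
      + ((PySem.List.pyRange 0 (n - 2) 1).map
          (fun i => tget t_list (PySem.List.pyGetD (x :: rest) i 0)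
            (PySem.List.pyGetD (x :: rest) (i + 1) 0))).sum
      = 0 + chainCost t_list 0 (x :: rest) := by
    rw [zero_add, chain_eq]
    have h0 : PySem.List.pyGetD (x :: rest) 0 0 = x := by
      simp [PySem.List.pyGetD_of_nonneg]
    have hneg := pyGetD_neg_one (x :: rest) (by simp)
    have hlen2 : (n - 2).toNat = rest.length := by
      simp at hplen; omega
    have hsum : ((PySem.List.pyRange 0 (n - 2) 1).map
          (fun i => tget t_list (PySem.List.pyGetD (x :: rest) i 0)
            (PySem.List.pyGetD (x :: rest) (i + 1) 0))).sum
        = ((List.range rest.length).map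
            (fun i => tget t_list ((x :: rest).getD i 0) ((x :: rest).getD (i + 1) 0))).sum := by
      rw [PySem.List.pyRange_zero, List.map_map, hlen2]
      refine congrArg List.sum (List.map_congr_left ?_)
      intro i _
      simp only [Function.comp]
      rw [PySem.List.pyGetD_natCast]
      rw [show ((i : Int) + 1) = ((i + 1 : Nat) : Int) by push_cast; ring,
        PySem.List.pyGetD_natCast]
    rw [h0, hneg, hsum]
    ring
  rw [hd]

-- ===== VERDICT (by name: the statement is the Claim_ definition above) =====
theorem solve_spec : Claim_equal_solve := by
  intro n k t_list _ hpre
  unfold Spec_solve solve_alt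
  exact solve_eq_dfsB n k t_list hpre.1

@[simp] theorem solve_raises : Claim_raises_solve := by
  unfold Claim_raises_solve
  refine ⟨?_, by decide⟩
  rintro n k t _ ⟨h1, -, -⟩ ⟨h2, -, -⟩
  omega
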